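-- pv_equiv track=rewrite | github.com/YanivHaliwa/vuln-analyzer | vuln_analyzer-GUI/utils/risk_categorizer.py | categorize_service
-- ===== SOURCE A (Python) =====
-- def categorize_service(service_info):
--     """
--     Categorize a service based on its description and known risk.
--
--     Args:
--         service_info (dict): Service information dictionary
--
--     Returns:
--         str: Severity category ('critical', 'high', 'medium', or 'low')
--     """
--     service_name = service_info.get('service', '').lower()
--     port = service_info.get('port', '')
--
--     # Critical services
--     critical_services = [
--         'ftp', 'telnet', 'rsh', 'rlogin', 'rexec',
--         'anonymous ftp', 'vsftpd 2.3'
--     ]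
--
--     # High risk services
--     high_risk_services = [
--         'smb', 'netbios', 'mysql', 'postgresql', 'mongodb',
--         'redis', 'vnc', 'x11', 'rmi', 'rmiregistry'
--     ]
--
--     # Medium risk services
--     medium_risk_services = [
--         'smtp', 'pop3', 'imap', 'http', 'snmp'
--     ]
--
--     if any(critical in service_name for critical in critical_services):
--         return 'critical'
--
--     if any(high_risk in service_name for high_risk in high_risk_services):
--         return 'high'
--
--     if any(medium_risk in service_name for medium_risk in medium_risk_services):
--         return 'medium'
--
--     return 'low'
-- ===== SOURCE B (Python) =====
-- _KW_RANK = {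
--     'ftp': 0, 'telnet': 0, 'rsh': 0, 'rlogin': 0, 'rexec': 0,
--     'anonymous ftp': 0, 'vsftpd 2.3': 0,
--     'smb': 1, 'netbios': 1, 'mysql': 1, 'postgresql': 1, 'mongodb': 1,
--     'redis': 1, 'vnc': 1, 'x11': 1, 'rmi': 1, 'rmiregistry': 1,
--     'smtp': 2, 'pop3': 2, 'imap': 2, 'http': 2, 'snmp': 2,
-- }
-- _WIDTHS = (3, 4, 5, 6, 7, 10, 11, 13)  # the distinct keyword lengths
-- _LABELS = ('critical', 'high', 'medium', 'low')
--
--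
-- def categorize_service(service_info):
--     """Multi-pattern window scan: slide over the name and hash each candidate
--     window (one per keyword length) into a keyword->rank dict; keep the min rank."""
--     name = service_info.get('service', '').lower()
--     best = 3
--     for i in range(len(name)):
--         for width in _WIDTHS:
--             rank = _KW_RANK.get(name[i:i + width])
--             if rank is not None and rank < best:
--                 best = rank
--     return _LABELS[best]
-- ===== Notes on version B (the rewrite author's own statement) =====
-- stated objective: alternative
-- what changed: Replaced A's keyword-driven scans (three priority-ordered any(kw in name) passes) by a text-driven multi-pattern window scan: slide over every position of the name, hash each candidate window (one per distinct keyword length) into a single keyword-to-rank dictionary, and keep the minimum rank seen.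
import Mathlib
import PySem

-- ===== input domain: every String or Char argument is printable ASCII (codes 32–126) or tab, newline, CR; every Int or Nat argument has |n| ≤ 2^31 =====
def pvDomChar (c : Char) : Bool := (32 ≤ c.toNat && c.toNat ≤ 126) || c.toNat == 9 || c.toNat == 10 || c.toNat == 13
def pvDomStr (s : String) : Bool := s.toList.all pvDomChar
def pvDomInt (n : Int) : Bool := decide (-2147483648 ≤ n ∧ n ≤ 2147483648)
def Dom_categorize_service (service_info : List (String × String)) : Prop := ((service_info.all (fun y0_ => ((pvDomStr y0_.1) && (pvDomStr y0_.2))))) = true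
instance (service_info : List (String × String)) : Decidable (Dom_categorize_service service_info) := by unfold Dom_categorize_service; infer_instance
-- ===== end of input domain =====

-- B replaces A's three keyword-driven any()-scans by a text-driven window scan: for every
-- position of the name it looks up each fixed-width window in one keyword→rank dictionary
-- and keeps the minimum rank (objective: alternative algorithm, same exact result).

-- ===== PORT A =====
def categorize_service (service_info : List (String × String)) : String :=
  let service_name := PySem.Str.lower ((PySem.Dict.ofList service_info).getD "service" "")
  let _port := (PySem.Dict.ofList service_info).getD "port" ""
  let critical_services := ["ftp", "telnet", "rsh", "rlogin", "rexec", "anonymous ftp", "vsftpd 2.3"]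
  let high_risk_services := ["smb", "netbios", "mysql", "postgresql", "mongodb", "redis", "vnc", "x11", "rmi", "rmiregistry"]
  let medium_risk_services := ["smtp", "pop3", "imap", "http", "snmp"]
  if critical_services.any (fun critical => PySem.Str.isIn critical service_name) then "critical"
  else if high_risk_services.any (fun high_risk => PySem.Str.isIn high_risk service_name) then "high"
  else if medium_risk_services.any (fun medium_risk => PySem.Str.isIn medium_risk service_name) then "medium"
  else "low"

-- ===== PORT B =====
def csKwPairs : List (String × Int) :=
  [("ftp", 0), ("telnet", 0), ("rsh", 0), ("rlogin", 0), ("rexec", 0),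
   ("anonymous ftp", 0), ("vsftpd 2.3", 0),
   ("smb", 1), ("netbios", 1), ("mysql", 1), ("postgresql", 1), ("mongodb", 1),
   ("redis", 1), ("vnc", 1), ("x11", 1), ("rmi", 1), ("rmiregistry", 1),
   ("smtp", 2), ("pop3", 2), ("imap", 2), ("http", 2), ("snmp", 2)]

def csKwRank : PySem.Dict String Int := PySem.Dict.ofList csKwPairs

def csWidths : List Int := [3, 4, 5, 6, 7, 10, 11, 13]

def csLabels : List String := ["critical", "high", "medium", "low"]

def categorize_service_alt (service_info : List (String × String)) : String :=
  let name := PySem.Str.lower ((PySem.Dict.ofList service_info).getD "service" "")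
  let best := (PySem.List.pyRange 0 (PySem.Str.len name) 1).foldl (fun best i =>
      csWidths.foldl (fun best width =>
        match csKwRank.get? (PySem.Str.slice name (some i) (some (i + width))) with
        | some rank => if rank < best then rank else best
        | none => best) best) 3
  PySem.List.pyGetD csLabels best ""

-- ===== PRECONDITION & SPEC =====
def Spec_categorize_service (service_info : List (String × String)) (out : String) : Prop := out = categorize_service_alt service_info
instance (service_info : List (String × String)) (out : String) : Decidable (Spec_categorize_service service_info out) := by unfold Spec_categorize_service; infer_instance

-- ===== CLAIM (what is proved, stated in full; the proofs are below) =====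
def Claim_equal_categorize_service : Prop := ∀ (service_info : List (String × String)), Dom_categorize_service service_info → Spec_categorize_service service_info (categorize_service service_info)

-- ===== LEMMAS AND PROOFS =====

-- the min-accumulating step B uses
def csMinStep (b r : Int) : Int := if r < b then r else b

theorem minfold_le_init (l : List Int) (b : Int) : l.foldl csMinStep b ≤ b := by
  induction l generalizing b with
  | nil => simp
  | cons x xs ih =>
    simp only [List.foldl_cons]
    refine le_trans (ih _) ?_
    unfold csMinStep; split_ifs <;> omega

theorem minfold_le_mem (l : List Int) (b r : Int) (h : r ∈ l) :
    l.foldl csMinStep b ≤ r := by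
  induction l generalizing b with
  | nil => cases h
  | cons x xs ih =>
    rcases List.mem_cons.mp h with rfl | hx
    · simp only [List.foldl_cons]
      refine le_trans (minfold_le_init _ _) ?_
      unfold csMinStep; split_ifs <;> omega
    · exact ih _ hx

theorem le_minfold (l : List Int) (b c : Int) (hb : c ≤ b) (h : ∀ r ∈ l, c ≤ r) :
    c ≤ l.foldl csMinStep b := by
  induction l generalizing b with
  | nil => simpa using hb
  | cons x xs ih =>
    simp only [List.foldl_cons]
    refine ih _ ?_ (fun r hr => h r (List.mem_cons_of_mem _ hr))
    have hx := h x (List.mem_cons_self)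
    unfold csMinStep; split_ifs <;> omega

theorem foldl_option_eq_filterMap {α : Type} (g : α → Option Int) (l : List α) (b : Int) :
    l.foldl (fun b x => match g x with | some r => if r < b then r else b | none => b) b
      = (l.filterMap g).foldl csMinStep b := by
  induction l generalizing b with
  | nil => rfl
  | cons x xs ih =>
    simp only [List.foldl_cons, List.filterMap_cons]
    cases hg : g x with
    | none => simpa using ih b
    | some r => simp only [List.foldl_cons, csMinStep]; exact ih _

theorem foldl_flatMap_eq {α β γ : Type} (f : α → List β) (g : γ → β → γ) (l : List α) (b : γ) :
    (l.flatMap f).foldl g b = l.foldl (fun b a => (f a).foldl g b) b := by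
  induction l generalizing b with
  | nil => rfl
  | cons x xs ih => simp only [List.flatMap_cons, List.foldl_append, List.foldl_cons, ih]

-- the multiset of ranks B's scan can find in `name`
def csCand (name : String) : List Int :=
  (PySem.List.pyRange 0 (PySem.Str.len name) 1).flatMap (fun i =>
    csWidths.filterMap (fun w => csKwRank.get? (PySem.Str.slice name (some i) (some (i + w)))))

theorem bestfold_eq_minfold_cand (name : String) :
    (PySem.List.pyRange 0 (PySem.Str.len name) 1).foldl (fun best i =>
        csWidths.foldl (fun best width =>
          match csKwRank.get? (PySem.Str.slice name (some i) (some (i + width))) with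
          | some rank => if rank < best then rank else best
          | none => best) best) 3
      = (csCand name).foldl csMinStep 3 := by
  unfold csCand
  rw [foldl_flatMap_eq]
  have hfun : (fun (best i : Int) =>
      csWidths.foldl (fun best width =>
        match csKwRank.get? (PySem.Str.slice name (some i) (some (i + width))) with
        | some rank => if rank < best then rank else best
        | none => best) best)
      = (fun (best i : Int) =>
        (csWidths.filterMap (fun w => csKwRank.get? (PySem.Str.slice name (some i) (some (i + w))))).foldl csMinStep best) := by
    funext b i
    exact foldl_option_eq_filterMap _ _ _
  rw [hfun]

theorem get?_kwRank (k : String) (r : Int) :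
    csKwRank.get? k = some r ↔ (k, r) ∈ csKwPairs := by
  have h2 : csKwRank.keys.Nodup := by decide
  rw [PySem.Dict.get?_eq_some_iff_mem_items _ _ _ h2]
  have h1 : csKwRank.items = csKwPairs := by decide
  rw [h1]

theorem mem_cand_iff (name : String) (r : Int) :
    r ∈ csCand name ↔ ∃ kw, (kw, r) ∈ csKwPairs ∧ PySem.Str.isIn kw name = true := by
  constructor
  · intro h
    simp only [csCand, List.mem_flatMap, List.mem_filterMap] at h
    obtain ⟨i, hi, w, hw, hg⟩ := h
    rw [PySem.List.mem_pyRange_one] at hi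
    have hmem := (get?_kwRank _ _).mp hg
    refine ⟨_, hmem, ?_⟩
    have hw0 : (0 : Int) ≤ w := by
      have : ∀ w ∈ csWidths, (0 : Int) ≤ w := by decide
      exact this w hw
    rw [PySem.Str.isIn_iff_infix]
    have htl : (PySem.Str.slice name (some i) (some (i + w))).toList
        = List.take ((i + w).toNat - i.toNat) (List.drop i.toNat name.toList) := by
      simp only [PySem.Str.toList_slice, PySem.Chars.slice_eq_listSlice]
      exact PySem.List.slice_toNat _ hi.1 (by omega)
    rw [htl]
    exact ((List.take_prefix _ _).isInfix).trans ((List.drop_suffix _ _).isInfix)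
  · rintro ⟨kw, hmem, hin⟩
    have hkw : 0 < kw.length ∧ ((kw.length : Int)) ∈ csWidths := by
      have : ∀ p ∈ csKwPairs, 0 < p.1.length ∧ ((p.1.length : Int)) ∈ csWidths := by decide
      exact this _ hmem
    rw [PySem.Str.isIn_iff_infix] at hin
    obtain ⟨s, t, hst⟩ := hin
    simp only [csCand, List.mem_flatMap, List.mem_filterMap]
    have hlen : name.toList.length = s.length + kw.toList.length + t.length := by
      rw [← hst]; simp; omega
    refine ⟨(s.length : Int), ?_, (kw.length : Int), hkw.2, ?_⟩
    · rw [PySem.List.mem_pyRange_one]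
      constructor
      · positivity
      · have : PySem.Str.len name = (name.toList.length : Int) := by
          simp [PySem.Str.len_eq]
        rw [this]
        have : 0 < kw.toList.length := by simpa using hkw.1
        omega
    · rw [get?_kwRank]
      have heq : PySem.Str.slice name (some (s.length : Int))
          (some ((s.length : Int) + (kw.length : Int))) = kw := by
        apply String.toList_inj.mp
        rw [PySem.Str.toList_slice, PySem.Chars.slice_eq_listSlice,
          PySem.List.slice_natCast_add]
        have hdrop : name.toList.drop s.length = kw.toList ++ t := by
          rw [← hst, List.append_assoc, List.drop_left]
        rw [hdrop]
        have : kw.length = kw.toList.length := by simp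
        rw [this, List.take_left]
      rw [heq]
      exact hmem

-- per-category facts about the keyword table (checked by computation)
theorem crit_sub : ∀ kw ∈ ["ftp", "telnet", "rsh", "rlogin", "rexec", "anonymous ftp", "vsftpd 2.3"], (kw, (0:Int)) ∈ csKwPairs := by decide
theorem high_sub : ∀ kw ∈ ["smb", "netbios", "mysql", "postgresql", "mongodb", "redis", "vnc", "x11", "rmi", "rmiregistry"], (kw, (1:Int)) ∈ csKwPairs := by decide
theorem med_sub : ∀ kw ∈ ["smtp", "pop3", "imap", "http", "snmp"], (kw, (2:Int)) ∈ csKwPairs := by decide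
theorem pairs_ranks : ∀ p ∈ csKwPairs,
    (p.2 = 0 ∧ p.1 ∈ ["ftp", "telnet", "rsh", "rlogin", "rexec", "anonymous ftp", "vsftpd 2.3"]) ∨
    (p.2 = 1 ∧ p.1 ∈ ["smb", "netbios", "mysql", "postgresql", "mongodb", "redis", "vnc", "x11", "rmi", "rmiregistry"]) ∨
    (p.2 = 2 ∧ p.1 ∈ ["smtp", "pop3", "imap", "http", "snmp"]) := by decide

theorem label0 : PySem.List.pyGetD csLabels 0 "" = "critical" := by decide
theorem label1 : PySem.List.pyGetD csLabels 1 "" = "high" := by decide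
theorem label2 : PySem.List.pyGetD csLabels 2 "" = "medium" := by decide
theorem label3 : PySem.List.pyGetD csLabels 3 "" = "low" := by decide

theorem categorize_core (name : String) :
    (if ["ftp", "telnet", "rsh", "rlogin", "rexec", "anonymous ftp", "vsftpd 2.3"].any
          (fun c => PySem.Str.isIn c name) then "critical"
     else if ["smb", "netbios", "mysql", "postgresql", "mongodb", "redis", "vnc", "x11", "rmi", "rmiregistry"].any
          (fun h => PySem.Str.isIn h name) then "high"
     else if ["smtp", "pop3", "imap", "http", "snmp"].any (fun m => PySem.Str.isIn m name) then "medium"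
     else "low")
    = PySem.List.pyGetD csLabels ((csCand name).foldl csMinStep 3) "" := by
  by_cases hc : ["ftp", "telnet", "rsh", "rlogin", "rexec", "anonymous ftp", "vsftpd 2.3"].any
      (fun c => PySem.Str.isIn c name) = true
  · obtain ⟨kw, hkmem, hkin⟩ := List.any_eq_true.mp hc
    have h0 : (0 : Int) ∈ csCand name :=
      (mem_cand_iff name 0).mpr ⟨kw, crit_sub kw hkmem, hkin⟩
    have hle : (csCand name).foldl csMinStep 3 ≤ 0 := minfold_le_mem _ _ _ h0
    have hge : (0 : Int) ≤ (csCand name).foldl csMinStep 3 := by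
      refine le_minfold _ _ _ (by norm_num) (fun r hr => ?_)
      obtain ⟨kw', hm, _⟩ := (mem_cand_iff name r).mp hr
      rcases pairs_ranks _ hm with ⟨h, _⟩ | ⟨h, _⟩ | ⟨h, _⟩ <;> simp at h <;> omega
    have h3 : (csCand name).foldl csMinStep 3 = 0 := le_antisymm hle hge
    rw [h3, label0, hc]
    simp
  · have hcf : ∀ kw ∈ ["ftp", "telnet", "rsh", "rlogin", "rexec", "anonymous ftp", "vsftpd 2.3"],
        PySem.Str.isIn kw name = false := by
      intro kw hm
      by_contra hne
      exact hc (List.any_eq_true.mpr ⟨kw, hm, by revert hne; cases PySem.Str.isIn kw name <;> simp⟩)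
    by_cases hh : ["smb", "netbios", "mysql", "postgresql", "mongodb", "redis", "vnc", "x11", "rmi", "rmiregistry"].any
        (fun h => PySem.Str.isIn h name) = true
    · obtain ⟨kw, hkmem, hkin⟩ := List.any_eq_true.mp hh
      have h1 : (1 : Int) ∈ csCand name :=
        (mem_cand_iff name 1).mpr ⟨kw, high_sub kw hkmem, hkin⟩
      have hle : (csCand name).foldl csMinStep 3 ≤ 1 := minfold_le_mem _ _ _ h1
      have hge : (1 : Int) ≤ (csCand name).foldl csMinStep 3 := by
        refine le_minfold _ _ _ (by norm_num) (fun r hr => ?_)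
        obtain ⟨kw', hm, hin'⟩ := (mem_cand_iff name r).mp hr
        rcases pairs_ranks _ hm with ⟨h, hc0⟩ | ⟨h, _⟩ | ⟨h, _⟩
        · exact absurd hin' (by rw [hcf kw' hc0]; simp)
        · simp at h; omega
        · simp at h; omega
      have h3 : (csCand name).foldl csMinStep 3 = 1 := le_antisymm hle hge
      simp only [Bool.not_eq_true] at hc
      rw [h3, label1, hc, hh]
      simp
    · have hhf : ∀ kw ∈ ["smb", "netbios", "mysql", "postgresql", "mongodb", "redis", "vnc", "x11", "rmi", "rmiregistry"],
          PySem.Str.isIn kw name = false := by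
        intro kw hm
        by_contra hne
        exact hh (List.any_eq_true.mpr ⟨kw, hm, by revert hne; cases PySem.Str.isIn kw name <;> simp⟩)
      by_cases hm : ["smtp", "pop3", "imap", "http", "snmp"].any (fun m => PySem.Str.isIn m name) = true
      · obtain ⟨kw, hkmem, hkin⟩ := List.any_eq_true.mp hm
        have h2 : (2 : Int) ∈ csCand name :=
          (mem_cand_iff name 2).mpr ⟨kw, med_sub kw hkmem, hkin⟩
        have hle : (csCand name).foldl csMinStep 3 ≤ 2 := minfold_le_mem _ _ _ h2
        have hge : (2 : Int) ≤ (csCand name).foldl csMinStep 3 := by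
          refine le_minfold _ _ _ (by norm_num) (fun r hr => ?_)
          obtain ⟨kw', hmm, hin'⟩ := (mem_cand_iff name r).mp hr
          rcases pairs_ranks _ hmm with ⟨h, hc0⟩ | ⟨h, hc1⟩ | ⟨h, _⟩
          · exact absurd hin' (by rw [hcf kw' hc0]; simp)
          · exact absurd hin' (by rw [hhf kw' hc1]; simp)
          · simp at h; omega
        have h3 : (csCand name).foldl csMinStep 3 = 2 := le_antisymm hle hge
        simp only [Bool.not_eq_true] at hc hh
        rw [h3, label2, hc, hh, hm]
        simp
      · have hmf : ∀ kw ∈ ["smtp", "pop3", "imap", "http", "snmp"],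
            PySem.Str.isIn kw name = false := by
          intro kw hmem
          by_contra hne
          exact hm (List.any_eq_true.mpr ⟨kw, hmem, by revert hne; cases PySem.Str.isIn kw name <;> simp⟩)
        have hge : (3 : Int) ≤ (csCand name).foldl csMinStep 3 := by
          refine le_minfold _ _ _ (le_refl _) (fun r hr => ?_)
          obtain ⟨kw', hmm, hin'⟩ := (mem_cand_iff name r).mp hr
          rcases pairs_ranks _ hmm with ⟨_, hc0⟩ | ⟨_, hc1⟩ | ⟨_, hc2⟩
          · exact absurd hin' (by rw [hcf kw' hc0]; simp)
          · exact absurd hin' (by rw [hhf kw' hc1]; simp)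
          · exact absurd hin' (by rw [hmf kw' hc2]; simp)
        have hle : (csCand name).foldl csMinStep 3 ≤ 3 := minfold_le_init _ _
        have h3 : (csCand name).foldl csMinStep 3 = 3 := le_antisymm hle hge
        simp only [Bool.not_eq_true] at hc hh hm
        rw [h3, label3, hc, hh, hm]
        simp

theorem body_eq (name : String) :
    (if ["ftp", "telnet", "rsh", "rlogin", "rexec", "anonymous ftp", "vsftpd 2.3"].any
          (fun c => PySem.Str.isIn c name) then "critical"
     else if ["smb", "netbios", "mysql", "postgresql", "mongodb", "redis", "vnc", "x11", "rmi", "rmiregistry"].any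
          (fun h => PySem.Str.isIn h name) then "high"
     else if ["smtp", "pop3", "imap", "http", "snmp"].any (fun m => PySem.Str.isIn m name) then "medium"
     else "low")
    = PySem.List.pyGetD csLabels
        ((PySem.List.pyRange 0 (PySem.Str.len name) 1).foldl (fun best i =>
          csWidths.foldl (fun best width =>
            match csKwRank.get? (PySem.Str.slice name (some i) (some (i + width))) with
            | some rank => if rank < best then rank else best
            | none => best) best) 3) "" := by
  rw [bestfold_eq_minfold_cand]
  exact categorize_core name

-- ===== VERDICT (by name: the statement is the Claim_ definition above) =====
theorem categorize_service_spec : Claim_equal_categorize_service := by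
  intro service_info _
  unfold Spec_categorize_service categorize_service categorize_service_alt
  exact body_eq _
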